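-- pv_equiv track=rewrite | github.com/ssoomin1/CosPro_Test | 모의고사4_7.py | solution
-- ===== SOURCE A (Python) =====
-- def solution(input):
--     answer=0
--     x=0
--     y=0
--     for i in input:
--         if i=='w': y-=1
--         elif i=='s':y+=1
--         elif i=='a':x-=1
--         elif i=='d':x+=1
--         if x==y:answer+=1
--     return answer
-- ===== SOURCE B (Python) =====
-- def solution(input):
--     INC = {'w': 1, 'd': 1, 'a': -1, 's': -1}
--
--     def rec(seg, t):
--         # returns (number of non-empty prefixes of seg whose increment-sum is t,
--         #          total increment-sum of seg); divide and conquer on halves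
--         if len(seg) == 1:
--             v = INC.get(seg[0], 0)
--             return ((1 if v == t else 0), v)
--         m = len(seg) // 2
--         cl, sl = rec(seg[:m], t)
--         cr, sr = rec(seg[m:], t - sl)
--         return (cl + cr, sl + sr)
--
--     if not input:
--         return 0
--     return rec(input, 0)[0]
-- ===== Notes on version B (the rewrite author's own statement) =====
-- stated objective: alternative
-- what changed: B replaces A's left-to-right two-coordinate state machine by a divide-and-conquer recursion: it splits the move list in halves and computes for each segment the pair (number of non-empty prefixes whose x-y increment-sum equals a target, total increment-sum), querying the right half with the target shifted by the left half's sum; the answer is the count for target 0.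
import Mathlib
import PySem

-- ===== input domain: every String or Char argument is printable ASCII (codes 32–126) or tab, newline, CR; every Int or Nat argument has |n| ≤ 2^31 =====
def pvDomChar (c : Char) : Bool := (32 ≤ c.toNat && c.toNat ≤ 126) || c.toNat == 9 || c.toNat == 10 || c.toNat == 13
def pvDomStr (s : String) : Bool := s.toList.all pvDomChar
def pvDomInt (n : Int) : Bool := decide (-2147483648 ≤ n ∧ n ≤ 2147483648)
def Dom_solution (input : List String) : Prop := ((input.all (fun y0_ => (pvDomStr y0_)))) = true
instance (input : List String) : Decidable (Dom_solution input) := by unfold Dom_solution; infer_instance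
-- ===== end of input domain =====

-- B replaces A's left-to-right state machine by a divide-and-conquer recursion on halves that
-- returns (count of non-empty prefixes with x-y increment-sum = target, total sum) per segment
-- (alternative decomposition, same answer).

-- ===== PORT A =====
-- one loop iteration of A: if/elif chain updating (answer, x, y), then count when x == y
def stepA (st : Int × Int × Int) (i : String) : Int × Int × Int :=
  let answer := st.1; let x := st.2.1; let y := st.2.2
  let p : Int × Int :=
    if i = "w" then (x, y - 1)
    else if i = "s" then (x, y + 1)
    else if i = "a" then (x - 1, y)
    else if i = "d" then (x + 1, y)
    else (x, y)
  let answer := if p.1 = p.2 then answer + 1 else answer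
  (answer, p.1, p.2)

def solution (input : List String) : Int :=
  (input.foldl stepA (0, 0, 0)).1

-- ===== PORT B =====
def pvInc : PySem.Dict String Int := PySem.Dict.ofList [("w", 1), ("d", 1), ("a", -1), ("s", -1)]

-- rec(seg, t) of Source B: (number of non-empty prefixes of seg with increment-sum t, total sum);
-- fuel = seg.length makes the halving recursion structural; the fuel-exhausted and [] branches
-- are unreachable from solution_alt and only make the recursion total
def recB (fuel : Nat) (seg : List String) (t : Int) : Int × Int :=
  match fuel, seg with
  | _, [] => (0, 0)
  | _, [c] =>
      let v := PySem.Dict.getD pvInc c 0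
      ((if v = t then 1 else 0), v)
  | 0, _ => (0, 0)
  | f + 1, _ :: _ :: _ =>
      let m : Nat := seg.length / 2
      let p := recB f (PySem.List.slice seg none (some (m : Int))) t
      let q := recB f (PySem.List.slice seg (some (m : Int)) none) (t - p.2)
      (p.1 + q.1, p.2 + q.2)

def solution_alt (input : List String) : Int :=
  match input with
  | [] => 0
  | _ => (recB input.length input 0).1

-- ===== PRECONDITION & SPEC =====
def Spec_solution (input : List String) (out : Int) : Prop := out = solution_alt input
instance (input : List String) (out : Int) : Decidable (Spec_solution input out) := by unfold Spec_solution; infer_instance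

-- ===== CLAIM (what is proved, stated in full; the proofs are below) =====
def Claim_equal_solution : Prop := ∀ (input : List String), Dom_solution input → Spec_solution input (solution input)

-- ===== LEMMAS AND PROOFS =====

-- the per-move x - y increment B's dict encodes
def incv (c : String) : Int := PySem.Dict.getD pvInc c 0

-- number of non-empty prefixes of l whose increment-sum equals t
def prefCnt : List String → Int → Int
  | [], _ => 0
  | c :: tl, t => (if incv c = t then 1 else 0) + prefCnt tl (t - incv c)

def smv (l : List String) : Int := (l.map incv).sum

theorem pvInc_getD (i : String) : PySem.Dict.getD pvInc i 0 =
    if i = "w" then 1 else if i = "d" then 1 else if i = "a" then -1 else if i = "s" then -1 else 0 := by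
  simp [pvInc, PySem.Dict.ofList, PySem.Dict.update, PySem.Dict.getD_eq_get?_getD,
    PySem.Dict.get?_insert, PySem.Dict.get?_empty]
  split_ifs <;> simp_all

theorem smv_append (L R : List String) : smv (L ++ R) = smv L + smv R := by
  simp [smv]

theorem prefCnt_append (L R : List String) (t : Int) :
    prefCnt (L ++ R) t = prefCnt L t + prefCnt R (t - smv L) := by
  induction L generalizing t with
  | nil => simp [prefCnt, smv]
  | cons c tl ih =>
      simp only [List.cons_append, prefCnt, ih, smv, List.map_cons, List.sum_cons]
      have : t - incv c - (tl.map incv).sum = t - (incv c + (tl.map incv).sum) := by ring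
      rw [this]
      ring

theorem recB_spec (fuel : Nat) (seg : List String) (t : Int)
    (h : seg.length ≤ fuel + 1) :
    recB fuel seg t = (prefCnt seg t, smv seg) := by
  induction fuel generalizing seg t with
  | zero =>
      match seg, h with
      | [], _ => simp [recB, prefCnt, smv]
      | [c], _ => simp [recB, prefCnt, smv, incv]
  | succ f ih =>
      match seg with
      | [] => simp [recB, prefCnt, smv]
      | [c] => simp [recB, prefCnt, smv, incv]
      | a :: b :: tl =>
          simp only [recB, PySem.List.slice_to_natCast, PySem.List.slice_from_natCast]
          have h1 : ((a :: b :: tl).take ((a :: b :: tl).length / 2)).length ≤ f + 1 := by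
            simp at h ⊢; omega
          have h2 : ((a :: b :: tl).drop ((a :: b :: tl).length / 2)).length ≤ f + 1 := by
            simp at h ⊢; omega
          rw [ih _ _ h1, ih _ _ h2]
          conv_rhs => rw [← List.take_append_drop ((a :: b :: tl).length / 2) (a :: b :: tl)]
          rw [prefCnt_append, smv_append]

theorem stepA_fst (ans x y : Int) (c : String) :
    (stepA (ans, x, y) c).1 = ans + (if incv c = y - x then 1 else 0) := by
  simp only [stepA, incv, pvInc_getD]
  split_ifs <;> simp_all <;> omega

theorem stepA_diff (ans x y : Int) (c : String) :
    (stepA (ans, x, y) c).2.2 - (stepA (ans, x, y) c).2.1 = (y - x) - incv c := by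
  simp only [stepA, incv, pvInc_getD]
  split_ifs <;> simp_all <;> ring

theorem foldA (l : List String) (ans x y : Int) :
    (l.foldl stepA (ans, x, y)).1 = ans + prefCnt l (y - x) := by
  induction l generalizing ans x y with
  | nil => simp [prefCnt]
  | cons c tl ih =>
      simp only [List.foldl_cons, prefCnt]
      have hst : stepA (ans, x, y) c =
          ((stepA (ans, x, y) c).1, (stepA (ans, x, y) c).2.1, (stepA (ans, x, y) c).2.2) := rfl
      rw [hst, ih]
      rw [stepA_fst]
      have hd := stepA_diff ans x y c
      rw [hd]
      ring

-- ===== VERDICT (by name: the statement is the Claim_ definition above) =====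
theorem solution_spec : Claim_equal_solution := by
  intro input _
  unfold Spec_solution solution solution_alt
  cases input with
  | nil => simp
  | cons c tl =>
      rw [recB_spec _ _ _ (by simp)]
      have := foldA (c :: tl) 0 0 0
      simp only [sub_zero] at this
      simpa using this
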